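-- pv_equiv track=rewrite | github.com/PitrPi/LeetCode | 726/solution.py | count_simple
-- ===== SOURCE A (Python) =====
-- from collections import Counter, defaultdict, deque
--
-- def count_simple(string: str) -> Counter:
--     c = Counter()
--     c[""] = 0
--     stack = ""
--     latest = ""
--     for idx, s in enumerate(string):
--
--         if ord(s) >= 97:
--             stack += s
--         elif s.isnumeric():
--             if stack.isnumeric():
--                 stack += s
--             else:
--                 latest = stack
--                 stack = s
--         else:
--             if stack.isnumeric():
--                 c[latest] += int(stack)
--                 stack = s
--             else:
--                 c[stack] += 1
--                 stack = s
--     if stack: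
--         if stack.isnumeric():
--             c[latest] += int(stack)
--         else:
--             c[stack] += 1
--     c.pop("")
--     return c
-- ===== SOURCE B (Python) =====
-- from collections import Counter
--
-- def count_simple(string: str) -> Counter:
--     # Single pass tracking the current token's start index and a numeric flag,
--     # instead of repeated string concatenation and isnumeric() rescans.
--     c = Counter()
--     latest = ""
--     start = 0
--     numeric = False
--     for i, ch in enumerate(string):
--         if ord(ch) >= 97:
--             numeric = False
--         elif ch.isdigit():
--             if not numeric:
--                 latest = string[start:i]
--                 start = i
--                 numeric = True
--         else:
--             if numeric:
--                 c[latest] += int(string[start:i])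
--             else:
--                 c[string[start:i]] += 1
--             start = i
--             numeric = False
--     if start < len(string):
--         if numeric:
--             c[latest] += int(string[start:])
--         else:
--             c[string[start:]] += 1
--     c.pop("", None)
--     return c
-- ===== Notes on version B (the rewrite author's own statement) =====
-- stated objective: faster
-- what changed: Replaces A's per-character string concatenation into `stack` plus repeated isnumeric() rescans of the whole token with a single pass that tracks only the current token's start index and a boolean numeric flag, slicing the token out of the input once, when it is flushed.
import Mathlib
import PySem

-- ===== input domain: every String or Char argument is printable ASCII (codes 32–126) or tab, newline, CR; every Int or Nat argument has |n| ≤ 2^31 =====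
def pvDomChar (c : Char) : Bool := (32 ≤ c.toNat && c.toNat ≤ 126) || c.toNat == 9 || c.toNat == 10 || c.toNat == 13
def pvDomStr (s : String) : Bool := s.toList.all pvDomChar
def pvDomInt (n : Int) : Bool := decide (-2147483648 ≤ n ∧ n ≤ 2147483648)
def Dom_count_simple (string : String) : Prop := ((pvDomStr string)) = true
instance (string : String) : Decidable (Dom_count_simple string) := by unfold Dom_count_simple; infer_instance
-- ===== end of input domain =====

-- B replaces A's string-concatenation token buffer and whole-token isnumeric() rescans by a single
-- pass over (index, char) that keeps only the token's start index and a numeric flag (objective: faster).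

-- ===== PORT A =====
-- loop state = (c, stack, latest); s.isnumeric() is Chars.isdigit/strIsdigit, exact on the ASCII domain
def aStep (st : PySem.Dict (List Char) Int × List Char × List Char) (s : Char) :
    PySem.Dict (List Char) Int × List Char × List Char :=
  if s.toNat ≥ 97 then (st.1, st.2.1 ++ [s], st.2.2)
  else if PySem.Chars.isdigit s then
    if PySem.Chars.strIsdigit st.2.1 then (st.1, st.2.1 ++ [s], st.2.2)
    else (st.1, [s], st.2.1)
  else
    if PySem.Chars.strIsdigit st.2.1 then
      -- int(stack): stack is nonempty all-digits in this branch, so ofChars? is some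
      (st.1.modify st.2.2 0 (· + (PySem.Int.ofChars? st.2.1).getD 0), [s], st.2.2)
    else (st.1.modify st.2.1 0 (· + 1), [s], st.2.2)

def count_simple (string : String) : List (String × Int) :=
  let st := string.toList.foldl aStep
    (((PySem.Dict.empty : PySem.Dict (List Char) Int).insert [] 0), ([] : List Char), ([] : List Char))
  let c := if st.2.1 ≠ [] then
      (if PySem.Chars.strIsdigit st.2.1 then
        st.1.modify st.2.2 0 (· + (PySem.Int.ofChars? st.2.1).getD 0)
      else st.1.modify st.2.1 0 (· + 1))
    else st.1
  (c.erase []).items.map (fun p => (String.ofList p.1, p.2))   -- c.pop(""); the Counter rendered as items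

-- ===== PORT B =====
-- loop state = (c, latest, start, numeric); string[a:b] is PySem.List.slice on the char list
def bStep (cs : List Char) (st : PySem.Dict (List Char) Int × List Char × Int × Bool)
    (p : Int × Char) : PySem.Dict (List Char) Int × List Char × Int × Bool :=
  if p.2.toNat ≥ 97 then (st.1, st.2.1, st.2.2.1, false)
  else if PySem.Chars.isdigit p.2 then
    if st.2.2.2 then st
    else (st.1, PySem.List.slice cs (some st.2.2.1) (some p.1), p.1, true)
  else
    if st.2.2.2 then
      (st.1.modify st.2.1 0
        (· + (PySem.Int.ofChars? (PySem.List.slice cs (some st.2.2.1) (some p.1))).getD 0),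
       st.2.1, p.1, false)
    else
      (st.1.modify (PySem.List.slice cs (some st.2.2.1) (some p.1)) 0 (· + 1), st.2.1, p.1, false)

def count_simple_alt (string : String) : List (String × Int) :=
  let cs := string.toList
  let st := (PySem.List.enumerate cs).foldl (bStep cs)
    ((PySem.Dict.empty : PySem.Dict (List Char) Int), ([] : List Char), (0 : Int), false)
  let c := if st.2.2.1 < (cs.length : Int) then
      (if st.2.2.2 then
        st.1.modify st.2.1 0 (· + (PySem.Int.ofChars? (PySem.List.slice cs (some st.2.2.1) none)).getD 0)
      else st.1.modify (PySem.List.slice cs (some st.2.2.1) none) 0 (· + 1))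
    else st.1
  (c.erase []).items.map (fun p => (String.ofList p.1, p.2))

-- ===== PRECONDITION & SPEC =====
def Spec_count_simple (string : String) (out : List (String × Int)) : Prop := out = count_simple_alt string
instance (string : String) (out : List (String × Int)) : Decidable (Spec_count_simple string out) := by unfold Spec_count_simple; infer_instance

-- ===== CLAIM (what is proved, stated in full; the proofs are below) =====
def Claim_equal_count_simple : Prop := ∀ (string : String), Dom_count_simple string → Spec_count_simple string (count_simple string)

-- ===== LEMMAS AND PROOFS =====

theorem find?_filter_ne {ν : Type} (t : List (List Char × ν)) (k j : List Char) (h : k ≠ j) :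
    List.find? (fun p => p.1 == k) (t.filter (fun p => !(p.1 == j))) =
    List.find? (fun p => p.1 == k) t := by
  induction t with
  | nil => rfl
  | cons p t ih =>
    rw [List.filter_cons]
    by_cases hj : p.1 = j
    · rw [if_neg (by simp [hj]), List.find?_cons_of_neg (by simp [hj, Ne.symm h]), ih]
    · rw [if_pos (by simp [hj])]
      by_cases hk : p.1 = k
      · rw [List.find?_cons_of_pos (by simp [hk]), List.find?_cons_of_pos (by simp [hk])]
      · rw [List.find?_cons_of_neg (by simp [hk]), List.find?_cons_of_neg (by simp [hk]), ih]

theorem getD_erase_ne {ν : Type} (d : PySem.Dict (List Char) ν) (k j : List Char) (d0 : ν)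
    (h : k ≠ j) : (d.erase j).getD k d0 = d.getD k d0 := by
  simp only [PySem.Dict.getD, PySem.Dict.get?, PySem.Dict.erase]
  rw [find?_filter_ne _ _ _ h]

theorem contains_erase_ne {ν : Type} (d : PySem.Dict (List Char) ν) (k j : List Char)
    (h : k ≠ j) : (d.erase j).contains k = d.contains k := by
  rw [PySem.Dict.contains_eq_isSome_get?, PySem.Dict.contains_eq_isSome_get?]
  simp only [PySem.Dict.get?, PySem.Dict.erase]
  rw [find?_filter_ne _ _ _ h]

theorem erase_insert_self {ν : Type} (d : PySem.Dict (List Char) ν) (j : List Char) (v : ν) :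
    (d.insert j v).erase j = d.erase j := by
  apply PySem.Dict.ext
  simp only [PySem.Dict.insert, PySem.Dict.erase]
  split
  · simp only [List.filter_map]
    have hcong : List.filter ((fun p : List Char × ν => !(p.1 == j)) ∘
        (fun p => if (p.1 == j) = true then (j, v) else p)) d.items =
        List.filter (fun p => !(p.1 == j)) d.items := by
      apply List.filter_congr
      intro p _
      by_cases hp : p.1 = j <;> simp [hp]
    rw [hcong]
    conv_rhs => rw [← List.map_id (List.filter (fun p => !(p.1 == j)) d.items)]
    apply List.map_congr_left
    intro p hp
    have hne : (p.1 == j) = false := by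
      have := List.of_mem_filter hp
      simpa using this
    simp [hne]
  · simp

theorem erase_insert_ne {ν : Type} (d : PySem.Dict (List Char) ν) (k j : List Char) (v : ν)
    (h : k ≠ j) : (d.insert k v).erase j = (d.erase j).insert k v := by
  have hc := contains_erase_ne d k j h
  apply PySem.Dict.ext
  by_cases hck : d.contains k = true
  · simp only [PySem.Dict.insert, PySem.Dict.erase] at hc ⊢
    rw [if_pos hck, if_pos (hc.trans hck)]
    simp only [List.filter_map]
    congr 1
    apply List.filter_congr
    intro p _
    by_cases hp : p.1 = k <;> simp [hp, Ne.symm, h]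
  · simp only [PySem.Dict.insert, PySem.Dict.erase] at hc ⊢
    rw [if_neg hck, if_neg (by rw [hc]; exact hck)]
    rw [List.filter_append]
    simp [h]

theorem rel_modify (da db : PySem.Dict (List Char) Int) (k : List Char) (δ : Int)
    (h : da.erase [] = db.erase []) :
    (da.modify k 0 (· + δ)).erase [] = (db.modify k 0 (· + δ)).erase [] := by
  simp only [PySem.Dict.modify]
  rcases eq_or_ne k ([] : List Char) with hk | hk
  · subst hk
    rw [erase_insert_self, erase_insert_self, h]
  · have hg : da.getD k 0 = db.getD k 0 := by
      rw [← getD_erase_ne da k [] 0 hk, ← getD_erase_ne db k [] 0 hk, h]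
    rw [erase_insert_ne _ _ _ _ hk, erase_insert_ne _ _ _ _ hk, h, hg]

-- char/token facts
theorem isdigit_false_of_ge97 (c : Char) (h : c.toNat ≥ 97) : PySem.Chars.isdigit c = false := by
  simp only [PySem.Chars.isdigit, Char.le_def, UInt32.le_iff_toNat_le, Char.toNat] at *
  simp only [Bool.and_eq_false_iff, decide_eq_false_iff_not, not_le]
  right
  have h9 : ('9' : Char).val.toNat = 57 := rfl
  omega

theorem strIsdigit_append (l : List Char) (c : Char) :
    PySem.Chars.strIsdigit (l ++ [c]) =
      ((l.isEmpty || PySem.Chars.strIsdigit l) && PySem.Chars.isdigit c) := by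
  cases l <;> simp [PySem.Chars.strIsdigit, List.all_append, Bool.and_comm, Bool.and_assoc, Bool.and_left_comm]

theorem strIsdigit_singleton (c : Char) : PySem.Chars.strIsdigit [c] = PySem.Chars.isdigit c := by
  simp [PySem.Chars.strIsdigit]

-- slice over natural bounds is the token between start and the current index
theorem slice_tok (cs : List Char) (s0 k : Nat) :
    PySem.List.slice cs (some (s0 : Int)) (some (k : Int)) = (cs.take k).drop s0 := by
  rw [PySem.List.slice_natCast, List.drop_take]

theorem main_inv (cs : List Char) (suf : List Char) :
    ∀ (k : Nat), cs.drop k = suf → k ≤ cs.length →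
    ∀ (ca cb : PySem.Dict (List Char) Int) (latest : List Char) (s0 : Nat), s0 ≤ k →
    ca.erase [] = cb.erase [] →
    ∃ s1 : Nat, s1 ≤ cs.length ∧
      (suf.foldl aStep (ca, (cs.take k).drop s0, latest)).2.1 = cs.drop s1 ∧
      (suf.foldl aStep (ca, (cs.take k).drop s0, latest)).2.2 =
        ((PySem.List.enumerate suf (k:Int)).foldl (bStep cs)
          (cb, latest, (s0:Int), PySem.Chars.strIsdigit ((cs.take k).drop s0))).2.1 ∧
      ((PySem.List.enumerate suf (k:Int)).foldl (bStep cs)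
          (cb, latest, (s0:Int), PySem.Chars.strIsdigit ((cs.take k).drop s0))).2.2.1 = (s1:Int) ∧
      ((PySem.List.enumerate suf (k:Int)).foldl (bStep cs)
          (cb, latest, (s0:Int), PySem.Chars.strIsdigit ((cs.take k).drop s0))).2.2.2 =
        PySem.Chars.strIsdigit (cs.drop s1) ∧
      (suf.foldl aStep (ca, (cs.take k).drop s0, latest)).1.erase [] =
        ((PySem.List.enumerate suf (k:Int)).foldl (bStep cs)
          (cb, latest, (s0:Int), PySem.Chars.strIsdigit ((cs.take k).drop s0))).1.erase [] := by
  induction suf with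
  | nil =>
    intro k hdrop hk ca cb latest s0 hs0 hrel
    have hlen : cs.length ≤ k := List.drop_eq_nil_iff.mp hdrop
    have hcs : cs.take k = cs := List.take_of_length_le hlen
    exact ⟨s0, le_trans hs0 hk, by simp only [hcs, List.foldl_nil], rfl, rfl,
      by simp only [hcs, PySem.List.enumerate_nil, List.foldl_nil], hrel⟩
  | cons ch rest ih =>
    intro k hdrop hk ca cb latest s0 hs0 hrel
    have hklt : k < cs.length := by
      by_contra hh
      push_neg at hh
      rw [List.drop_eq_nil_of_le hh] at hdrop
      exact (List.cons_ne_nil ch rest) hdrop.symm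
    have hrest : cs.drop (k+1) = rest := by
      have h1 : (cs.drop k).drop 1 = rest := by rw [hdrop]; rfl
      rw [List.drop_drop] at h1
      simpa [Nat.add_comm] using h1
    have hget : cs[k]? = some ch := by
      have h0 : (cs.drop k)[0]? = cs[k + 0]? := List.getElem?_drop
      rw [hdrop] at h0
      simpa using h0.symm
    have htake : cs.take (k+1) = cs.take k ++ [ch] := by
      rw [List.take_succ, hget]
      rfl
    have hlt : (cs.take k).length = k := by
      simp [List.length_take]
      omega
    have hstk : ∀ s : Nat, s ≤ k → (cs.take (k+1)).drop s = (cs.take k).drop s ++ [ch] := by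
      intro s hs
      rw [htake, List.drop_append_of_le_length (by omega)]
    have hnew : (cs.take (k+1)).drop k = [ch] := by
      rw [hstk k le_rfl, List.drop_eq_nil_of_le (by omega), List.nil_append]
    rw [List.foldl_cons, PySem.List.enumerate_cons, List.foldl_cons]
    have hcast : ((k:Int) + 1) = ((k+1 : Nat) : Int) := by push_cast; ring
    rw [hcast]
    by_cases h97 : ch.toNat ≥ 97
    · have hdig := isdigit_false_of_ge97 ch h97
      simp only [aStep, bStep, if_pos h97]
      have := ih (k+1) hrest (by omega) ca cb latest s0 (by omega) hrel
      rw [hstk s0 hs0, strIsdigit_append, hdig] at this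
      simp only [Bool.and_false] at this
      exact this
    · by_cases hdig : PySem.Chars.isdigit ch = true
      · by_cases hnum : PySem.Chars.strIsdigit ((cs.take k).drop s0) = true
        · simp only [aStep, bStep, if_neg h97, if_pos hdig, hnum, if_true]
          have := ih (k+1) hrest (by omega) ca cb latest s0 (by omega) hrel
          rw [hstk s0 hs0, strIsdigit_append, hdig, hnum] at this
          simp only [Bool.or_true, Bool.true_and, Bool.and_true] at this
          exact this
        · rw [Bool.not_eq_true] at hnum
          simp only [aStep, bStep, if_neg h97, if_pos hdig, hnum, Bool.false_eq_true, if_false]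
          rw [slice_tok]
          have := ih (k+1) hrest (by omega) ca cb ((cs.take k).drop s0) k (by omega) hrel
          rw [hnew, strIsdigit_singleton, hdig] at this
          exact this
      · have hdig' : PySem.Chars.isdigit ch = false := by rwa [Bool.not_eq_true] at hdig
        by_cases hnum : PySem.Chars.strIsdigit ((cs.take k).drop s0) = true
        · simp only [aStep, bStep, if_neg h97, hdig', Bool.false_eq_true, if_false, hnum, if_true]
          rw [slice_tok]
          have hrel' := rel_modify ca cb latest ((PySem.Int.ofChars? ((cs.take k).drop s0)).getD 0) hrel
          have := ih (k+1) hrest (by omega)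
            (ca.modify latest 0 (· + (PySem.Int.ofChars? ((cs.take k).drop s0)).getD 0))
            (cb.modify latest 0 (· + (PySem.Int.ofChars? ((cs.take k).drop s0)).getD 0))
            latest k (by omega) hrel'
          rw [hnew, strIsdigit_singleton, hdig'] at this
          exact this
        · rw [Bool.not_eq_true] at hnum
          simp only [aStep, bStep, if_neg h97, hdig', Bool.false_eq_true, if_false, hnum]
          rw [slice_tok]
          have hrel' := rel_modify ca cb ((cs.take k).drop s0) 1 hrel
          have := ih (k+1) hrest (by omega)
            (ca.modify ((cs.take k).drop s0) 0 (· + 1))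
            (cb.modify ((cs.take k).drop s0) 0 (· + 1))
            latest k (by omega) hrel'
          rw [hnew, strIsdigit_singleton, hdig'] at this
          exact this

-- ===== VERDICT (by name: the statement is the Claim_ definition above) =====
theorem count_simple_spec : Claim_equal_count_simple := by
  intro string _
  show count_simple string = count_simple_alt string
  unfold count_simple count_simple_alt
  dsimp only
  have hrel0 : ((PySem.Dict.empty : PySem.Dict (List Char) Int).insert [] 0).erase [] =
      (PySem.Dict.empty : PySem.Dict (List Char) Int).erase [] := by rfl
  have h0 := main_inv string.toList string.toList 0 List.drop_zero (Nat.zero_le _)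
    ((PySem.Dict.empty : PySem.Dict (List Char) Int).insert [] 0)
    (PySem.Dict.empty : PySem.Dict (List Char) Int) [] 0 le_rfl hrel0
  simp only [List.take_zero, List.drop_nil, Nat.cast_zero,
    show PySem.Chars.strIsdigit [] = false from rfl] at h0
  obtain ⟨s1, hs1, hstack, hlatest, hstart, hflag, hdict⟩ := h0
  rw [hstack, hlatest, hstart, hflag, PySem.List.slice_from_natCast]
  by_cases hlt : s1 < string.toList.length
  · have hne : List.drop s1 string.toList ≠ [] := by
      intro hnil
      have h2 : string.toList.length ≤ s1 := List.drop_eq_nil_iff.mp hnil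
      omega
    have hltI : (s1 : Int) < (string.toList.length : Int) := by exact_mod_cast hlt
    rw [if_pos hne, if_pos hltI]
    by_cases hd : PySem.Chars.strIsdigit (List.drop s1 string.toList) = true
    · rw [if_pos hd, if_pos hd, rel_modify _ _ _ _ hdict]
    · rw [if_neg hd, if_neg hd, rel_modify _ _ _ _ hdict]
  · have h2 : string.toList.length ≤ s1 := by omega
    have hne : ¬ (List.drop s1 string.toList ≠ []) := fun h => h (List.drop_eq_nil_of_le h2)
    have hltI : ¬ ((s1 : Int) < (string.toList.length : Int)) := by exact_mod_cast hlt
    rw [if_neg hne, if_neg hltI, hdict]
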